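-- pv_equiv track=rewrite | github.com/charliegautreaux/EC2-EBS-RDS-Inventory-Tool | lib_calipers.py | analyze_engine_info
-- ===== SOURCE A (Python) =====
-- def analyze_engine_info(engine, engine_version, engine_mode):
--
--     if engine_mode == "serverless":
--         return False, False
--
--     engine_version_parsed = engine_version.split(".")
--     needs_upgrade = False
--
--     try:
--         if engine == "aurora" or engine == "aurora-mysql":
--             major_version = (int(engine_version_parsed[0]), int(
--                 engine_version_parsed[1]))
--             if major_version[0] != 5 or major_version[1] < 6:
--                 return False, False
--
--             if major_version[1] == 6:
--                 needs_upgrade = engine_version < "5.6.mysql_aurora.1.19.2"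
--             elif major_version[1] == 7:
--                 needs_upgrade = engine_version < "5.7.mysql_aurora.2.04.4"
--
--         elif engine == "mysql":
--             major_version = (int(engine_version_parsed[0]), int(
--                 engine_version_parsed[1]))
--
--             if major_version[0] == 5 and major_version[1] < 6:
--                 return False, False
--
--             if major_version[1] == 6:
--                 needs_upgrade = engine_version < "5.6.40"
--             elif major_version[1] == 7:
--                 needs_upgrade = engine_version < "5.7.24"
--             elif major_version[1] == 8:
--                 needs_upgrade = engine_version < "8.0.13"
--
--         elif engine == "postgres" or engine == "aurora-postgresql":
--             major_version = (int(engine_version_parsed[0]), int(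
--                 engine_version_parsed[1]))
--             upgrade_targets = [((9, 4), 21), ((9, 5), 16),
--                                ((9, 6), 12), ((10, 0), 7), ((11, 0), 2)]
--
--             if major_version[0] > 11:
--                 return False, False
--
--             elif major_version[0] == 9:
--                 for upgrade_target in upgrade_targets:
--                     # ex: 9.6.12
--                     if major_version[1] == upgrade_target[0][1] and int(engine_version_parsed[2]) < upgrade_target[1]:
--                         needs_upgrade = True
--                         break
--             else:
--                 for upgrade_target in upgrade_targets:
--                     # ex: 10.4
--                     if major_version[0] == upgrade_target[0][0] and major_version[1] < upgrade_target[1]: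
--                         needs_upgrade = True
--                         break
--         else:
--             return False, False
--     except Exception:
--         return False, False
--
--     return True, needs_upgrade
-- ===== SOURCE B (Python) =====
-- # Data-driven rewrite: the per-engine if/elif cascades and the two scans over
-- # upgrade_targets are replaced by one declarative spec table (reject code +
-- # list of match rules) evaluated by a single generic interpreter loop.
-- # Rule = (major-to-match or None, minor-to-match or None, compare-kind, threshold).
-- _AURORA_RULES = [(None, 6, "str", "5.6.mysql_aurora.1.19.2"),
--                  (None, 7, "str", "5.7.mysql_aurora.2.04.4")]
-- _MYSQL_RULES = [(None, 6, "str", "5.6.40"),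
--                 (None, 7, "str", "5.7.24"),
--                 (None, 8, "str", "8.0.13")]
-- _PG_RULES = [(9, 4, "patch", 21), (9, 5, "patch", 16), (9, 6, "patch", 12),
--              (10, None, "minor", 7), (11, None, "minor", 2)]
-- _SPECS = {"aurora": ("aurora", _AURORA_RULES),
--           "aurora-mysql": ("aurora", _AURORA_RULES),
--           "mysql": ("mysql", _MYSQL_RULES),
--           "postgres": ("pg", _PG_RULES),
--           "aurora-postgresql": ("pg", _PG_RULES)}
--
--
-- def analyze_engine_info(engine, engine_version, engine_mode):
--     if engine_mode == "serverless":
--         return False, False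
--     spec = _SPECS.get(engine)
--     if spec is None:
--         return False, False
--     reject, rules = spec
--     parts = engine_version.split(".")
--     try:
--         major, minor = int(parts[0]), int(parts[1])
--         if (reject == "aurora" and (major != 5 or minor < 6)
--                 or reject == "mysql" and major == 5 and minor < 6
--                 or reject == "pg" and major > 11):
--             return False, False
--         for ema, emi, kind, thr in rules:
--             if (ema is None or ema == major) and (emi is None or emi == minor):
--                 if kind == "str":
--                     return True, engine_version < thr
--                 if kind == "patch":
--                     return True, int(parts[2]) < thr
--                 return True, minor < thr
--         return True, False
--     except Exception:
--         return False, False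
-- ===== Notes on version B (the rewrite author's own statement) =====
-- stated objective: alternative
-- what changed: Replaces the per-engine if/elif version cascades and the two loops over upgrade_targets with one declarative rule table (reject code plus match rules) evaluated by a single generic interpreter loop shared by all engines.
-- intended difference: For postgres/aurora-postgresql versions 9.0.* A's minor-version loop accidentally matches the (10,0)/(11,0) table entries, so A returns (True, True) when the patch component parses below 7 and (False, False) when it is absent/unparseable; B returns (True, False) since no 9.0 upgrade rule exists, which is the intended reading of the upgrade table. — e.g. on analyze_engine_info("postgres", "9.0.1", "provisioned"): A returns (true, true), B returns (true, false)
import Mathlib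
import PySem

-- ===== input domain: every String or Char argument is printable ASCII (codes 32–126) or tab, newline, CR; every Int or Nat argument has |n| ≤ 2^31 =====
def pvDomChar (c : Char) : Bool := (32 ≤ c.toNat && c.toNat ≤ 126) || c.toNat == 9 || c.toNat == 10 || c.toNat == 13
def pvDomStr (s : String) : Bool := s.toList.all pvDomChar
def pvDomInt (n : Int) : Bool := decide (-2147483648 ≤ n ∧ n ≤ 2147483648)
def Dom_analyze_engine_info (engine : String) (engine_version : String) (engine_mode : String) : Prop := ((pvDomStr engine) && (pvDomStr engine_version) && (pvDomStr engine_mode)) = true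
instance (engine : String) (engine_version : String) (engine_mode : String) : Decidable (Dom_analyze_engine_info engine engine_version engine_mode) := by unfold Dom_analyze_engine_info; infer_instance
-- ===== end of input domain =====

-- B replaces A's per-engine if/elif cascades and its two loops over upgrade_targets with one
-- declarative rule table evaluated by a single generic interpreter loop; same result except the
-- stated postgres 9.0 difference.

-- ===== PORT A =====
-- engine_version.split(".") — sep "." is nonempty so Str.split? always returns some
def pvSplitDot (s : String) : List String := (PySem.Str.split? s ".").getD []

-- int(parsed[0]), int(parsed[1]) — `none` where Python raises (caught by the except)
def pvParseMM (parts : List String) : Option (Int × Int) :=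
  match PySem.List.pyGet? parts 0 with
  | none => none
  | some s0 =>
    match PySem.Int.ofStr? s0 with
    | none => none
    | some m0 =>
      match PySem.List.pyGet? parts 1 with
      | none => none
      | some s1 =>
        match PySem.Int.ofStr? s1 with
        | none => none
        | some m1 => some (m0, m1)

def pvUpgradeTargets : List ((Int × Int) × Int) :=
  [((9, 4), 21), ((9, 5), 16), ((9, 6), 12), ((10, 0), 7), ((11, 0), 2)]

-- the `major_version[0] == 9` for-loop with break; `none` = exception from int(parsed[2])
def pvPgLoop9 (minor : Int) (parts : List String) : List ((Int × Int) × Int) → Option Bool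
  | [] => some false
  | t :: ts =>
    if minor = t.1.2 then
      match PySem.List.pyGet? parts 2 with
      | none => none
      | some s2 =>
        match PySem.Int.ofStr? s2 with
        | none => none
        | some p2 => if p2 < t.2 then some true else pvPgLoop9 minor parts ts
    else pvPgLoop9 minor parts ts

-- the other for-loop with break (no exception possible)
def pvPgLoopOther (major minor : Int) : List ((Int × Int) × Int) → Bool
  | [] => false
  | t :: ts => if major = t.1.1 ∧ minor < t.2 then true else pvPgLoopOther major minor ts

-- the try-block: `none` = an exception reached the except-handler
def pvTryA (engine engine_version : String) (parts : List String) : Option (Bool × Bool) :=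
  if engine = "aurora" ∨ engine = "aurora-mysql" then
    match pvParseMM parts with
    | none => none
    | some (m0, m1) =>
      if m0 ≠ 5 ∨ m1 < 6 then some (false, false)
      else if m1 = 6 then some (true, decide (engine_version < "5.6.mysql_aurora.1.19.2"))
      else if m1 = 7 then some (true, decide (engine_version < "5.7.mysql_aurora.2.04.4"))
      else some (true, false)
  else if engine = "mysql" then
    match pvParseMM parts with
    | none => none
    | some (m0, m1) =>
      if m0 = 5 ∧ m1 < 6 then some (false, false)
      else if m1 = 6 then some (true, decide (engine_version < "5.6.40"))
      else if m1 = 7 then some (true, decide (engine_version < "5.7.24"))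
      else if m1 = 8 then some (true, decide (engine_version < "8.0.13"))
      else some (true, false)
  else if engine = "postgres" ∨ engine = "aurora-postgresql" then
    match pvParseMM parts with
    | none => none
    | some (m0, m1) =>
      if m0 > 11 then some (false, false)
      else if m0 = 9 then
        match pvPgLoop9 m1 parts pvUpgradeTargets with
        | none => none
        | some b => some (true, b)
      else some (true, pvPgLoopOther m0 m1 pvUpgradeTargets)
  else some (false, false)

def analyze_engine_info (engine : String) (engine_version : String) (engine_mode : String) : Bool × Bool :=
  if engine_mode = "serverless" then (false, false)
  else
    match pvTryA engine engine_version (pvSplitDot engine_version) with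
    | none => (false, false)          -- except Exception: return False, False
    | some r => r

-- ===== PORT B =====
-- compare-kind + threshold of one rule ("str" thr / "patch" t / "minor" t)
inductive PvKind : Type
  | strK : String → PvKind
  | patchK : Int → PvKind
  | minorK : Int → PvKind
deriving DecidableEq, Repr

-- (ema is None or ema == v)
def pvMatches (e : Option Int) (v : Int) : Bool :=
  match e with
  | none => true
  | some w => w == v

def pvAuroraRules : List (Option Int × Option Int × PvKind) :=
  [(none, some 6, .strK "5.6.mysql_aurora.1.19.2"),
   (none, some 7, .strK "5.7.mysql_aurora.2.04.4")]
def pvMysqlRules : List (Option Int × Option Int × PvKind) :=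
  [(none, some 6, .strK "5.6.40"), (none, some 7, .strK "5.7.24"), (none, some 8, .strK "8.0.13")]
def pvPgRules : List (Option Int × Option Int × PvKind) :=
  [(some 9, some 4, .patchK 21), (some 9, some 5, .patchK 16), (some 9, some 6, .patchK 12),
   (some 10, none, .minorK 7), (some 11, none, .minorK 2)]

def pvSpecs : PySem.Dict String (String × List (Option Int × Option Int × PvKind)) :=
  PySem.Dict.ofList
    [("aurora", ("aurora", pvAuroraRules)),
     ("aurora-mysql", ("aurora", pvAuroraRules)),
     ("mysql", ("mysql", pvMysqlRules)),
     ("postgres", ("pg", pvPgRules)),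
     ("aurora-postgresql", ("pg", pvPgRules))]

-- the early-reject boolean expression, keyed by the spec's reject code
def pvReject (code : String) (major minor : Int) : Bool :=
  (code == "aurora" && (!(major == 5) || decide (minor < 6))) ||
  (code == "mysql" && (major == 5) && decide (minor < 6)) ||
  (code == "pg" && decide (major > 11))

-- the generic `for ema, emi, kind, thr in rules` interpreter loop; `none` = exception from int(parts[2])
def pvScan (ev : String) (parts : List String) (major minor : Int) :
    List (Option Int × Option Int × PvKind) → Option (Bool × Bool)
  | [] => some (true, false)
  | (ema, emi, k) :: rest =>
    if pvMatches ema major && pvMatches emi minor then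
      match k with
      | .strK thr => some (true, decide (ev < thr))
      | .patchK t =>
        match PySem.List.pyGet? parts 2 with
        | none => none
        | some s2 =>
          match PySem.Int.ofStr? s2 with
          | none => none
          | some p2 => some (true, decide (p2 < t))
      | .minorK t => some (true, decide (minor < t))
    else pvScan ev parts major minor rest

def analyze_engine_info_alt (engine : String) (engine_version : String) (engine_mode : String) : Bool × Bool :=
  if engine_mode = "serverless" then (false, false)
  else
    match PySem.Dict.get? pvSpecs engine with
    | none => (false, false)
    | some (reject, rules) =>
      match pvParseMM (pvSplitDot engine_version) with
      | none => (false, false)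
      | some (major, minor) =>
        if pvReject reject major minor then (false, false)
        else
          match pvScan engine_version (pvSplitDot engine_version) major minor rules with
          | none => (false, false)
          | some r => r

-- ===== PRECONDITION & SPEC =====
-- For postgres/aurora-postgresql versions 9.0.* A's minor-version loop accidentally matches the
-- (10,0)/(11,0) table entries, so A returns (True, True) when the patch component parses below 7 and
-- (False, False) when it is absent/unparseable; B returns (True, False) since no 9.0 upgrade rule
-- exists, which is the intended reading of the upgrade table.
def D_analyze_engine_info (engine : String) (engine_version : String) (engine_mode : String) : Prop :=
  engine_mode ≠ "serverless" ∧
  (engine = "postgres" ∨ engine = "aurora-postgresql") ∧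
  (PySem.List.pyGet? (pvSplitDot engine_version) 0).bind PySem.Int.ofStr? = some 9 ∧
  (PySem.List.pyGet? (pvSplitDot engine_version) 1).bind PySem.Int.ofStr? = some 0 ∧
  (((PySem.List.pyGet? (pvSplitDot engine_version) 2).bind PySem.Int.ofStr?).all
    (fun p2 => decide (p2 < 7))) = true
instance (engine : String) (engine_version : String) (engine_mode : String) : Decidable (D_analyze_engine_info engine engine_version engine_mode) := by unfold D_analyze_engine_info; infer_instance

def Spec_analyze_engine_info (engine : String) (engine_version : String) (engine_mode : String) (out : Bool × Bool) : Prop := ¬ D_analyze_engine_info engine engine_version engine_mode → out = analyze_engine_info_alt engine engine_version engine_mode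
instance (engine : String) (engine_version : String) (engine_mode : String) (out : Bool × Bool) : Decidable (Spec_analyze_engine_info engine engine_version engine_mode out) := by unfold Spec_analyze_engine_info; infer_instance

def pvDiffWitness_analyze_engine_info : String × String × String := ("postgres", "9.0.1", "provisioned")
def pvDiffWitnessOut_analyze_engine_info : (Bool × Bool) × (Bool × Bool) := ((true, true), (true, false))

-- ===== CLAIM (what is proved, stated in full; the proofs are below) =====
def Claim_unchanged_analyze_engine_info : Prop := ∀ (engine : String) (engine_version : String) (engine_mode : String), Dom_analyze_engine_info engine engine_version engine_mode → Spec_analyze_engine_info engine engine_version engine_mode (analyze_engine_info engine engine_version engine_mode)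
def Claim_changed_analyze_engine_info : Prop := Dom_analyze_engine_info (pvDiffWitness_analyze_engine_info.1) (pvDiffWitness_analyze_engine_info.2.1) (pvDiffWitness_analyze_engine_info.2.2) ∧ D_analyze_engine_info (pvDiffWitness_analyze_engine_info.1) (pvDiffWitness_analyze_engine_info.2.1) (pvDiffWitness_analyze_engine_info.2.2) ∧ analyze_engine_info (pvDiffWitness_analyze_engine_info.1) (pvDiffWitness_analyze_engine_info.2.1) (pvDiffWitness_analyze_engine_info.2.2) = pvDiffWitnessOut_analyze_engine_info.1 ∧ analyze_engine_info_alt (pvDiffWitness_analyze_engine_info.1) (pvDiffWitness_analyze_engine_info.2.1) (pvDiffWitness_analyze_engine_info.2.2) = pvDiffWitnessOut_analyze_engine_info.2 ∧ pvDiffWitnessOut_analyze_engine_info.1 ≠ pvDiffWitnessOut_analyze_engine_info.2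
def Claim_exact_analyze_engine_info : Prop := ∀ (engine : String) (engine_version : String) (engine_mode : String), Dom_analyze_engine_info engine engine_version engine_mode → D_analyze_engine_info engine engine_version engine_mode → analyze_engine_info engine engine_version engine_mode ≠ analyze_engine_info_alt engine engine_version engine_mode

-- ===== LEMMAS AND PROOFS =====

theorem pvParseMM_fst_snd (parts : List String) (m0 m1 : Int)
    (h : pvParseMM parts = some (m0, m1)) :
    (PySem.List.pyGet? parts 0).bind PySem.Int.ofStr? = some m0 ∧
    (PySem.List.pyGet? parts 1).bind PySem.Int.ofStr? = some m1 := by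
  unfold pvParseMM at h
  cases h0 : PySem.List.pyGet? parts 0 <;> rw [h0] at h <;> simp_all
  cases h1 : PySem.Int.ofStr? _ <;> rw [h1] at h <;> simp_all
  cases h2 : PySem.List.pyGet? parts 1 <;> rw [h2] at h <;> simp_all
  cases h3 : PySem.Int.ofStr? _ <;> rw [h3] at h <;> simp_all

theorem pvParseMM_of_components (parts : List String) (m0 m1 : Int)
    (h0 : (PySem.List.pyGet? parts 0).bind PySem.Int.ofStr? = some m0)
    (h1 : (PySem.List.pyGet? parts 1).bind PySem.Int.ofStr? = some m1) :
    pvParseMM parts = some (m0, m1) := by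
  unfold pvParseMM
  cases hg0 : PySem.List.pyGet? parts 0 <;> rw [hg0] at h0 <;> simp_all
  cases hg1 : PySem.List.pyGet? parts 1 <;> rw [hg1] at h1 <;> simp_all

-- the generic scan on each concrete rule list, expanded
theorem pvScan_aurora (ev : String) (parts : List String) (m0 m1 : Int) :
    pvScan ev parts m0 m1 pvAuroraRules =
      (if m1 = 6 then some (true, decide (ev < "5.6.mysql_aurora.1.19.2"))
       else if m1 = 7 then some (true, decide (ev < "5.7.mysql_aurora.2.04.4"))
       else some (true, false)) := by
  by_cases h6 : m1 = 6
  · subst h6; rfl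
  · by_cases h7 : m1 = 7
    · subst h7; rfl
    · have e6 : ((6 : Int) == m1) = false := by simp [Ne.symm h6]
      have e7 : ((7 : Int) == m1) = false := by simp [Ne.symm h7]
      simp [pvScan, pvAuroraRules, pvMatches, e6, e7, h6, h7]

theorem pvScan_mysql (ev : String) (parts : List String) (m0 m1 : Int) :
    pvScan ev parts m0 m1 pvMysqlRules =
      (if m1 = 6 then some (true, decide (ev < "5.6.40"))
       else if m1 = 7 then some (true, decide (ev < "5.7.24"))
       else if m1 = 8 then some (true, decide (ev < "8.0.13"))
       else some (true, false)) := by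
  by_cases h6 : m1 = 6
  · subst h6; rfl
  · by_cases h7 : m1 = 7
    · subst h7; rfl
    · by_cases h8 : m1 = 8
      · subst h8; rfl
      · have e6 : ((6 : Int) == m1) = false := by simp [Ne.symm h6]
        have e7 : ((7 : Int) == m1) = false := by simp [Ne.symm h7]
        have e8 : ((8 : Int) == m1) = false := by simp [Ne.symm h8]
        simp [pvScan, pvMysqlRules, pvMatches, e6, e7, e8, h6, h7, h8]

def pvPatch (parts : List String) (t : Int) : Option (Bool × Bool) :=
  match PySem.List.pyGet? parts 2 with
  | none => none
  | some s2 =>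
    match PySem.Int.ofStr? s2 with
    | none => none
    | some p2 => some (true, decide (p2 < t))

theorem pvScan_pg (ev : String) (parts : List String) (m0 m1 : Int) :
    pvScan ev parts m0 m1 pvPgRules =
      (if m0 = 9 then
         if m1 = 4 then pvPatch parts 21
         else if m1 = 5 then pvPatch parts 16
         else if m1 = 6 then pvPatch parts 12
         else some (true, false)
       else if m0 = 10 then some (true, decide (m1 < 7))
       else if m0 = 11 then some (true, decide (m1 < 2))
       else some (true, false)) := by
  have em : ∀ (a b : Int), a ≠ b → ((a == b) = false) := by intro a b h; simp [h]
  by_cases h9 : m0 = 9 <;> by_cases h10 : m0 = 10 <;> by_cases h11 : m0 = 11 <;>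
    try omega
  · subst h9
    by_cases h4 : m1 = 4
    · subst h4; rfl
    · by_cases h5 : m1 = 5
      · subst h5; rfl
      · by_cases h6 : m1 = 6
        · subst h6; rfl
        · simp [pvScan, pvPgRules, pvMatches, em _ _ (Ne.symm h4), em _ _ (Ne.symm h5),
                em _ _ (Ne.symm h6), h4, h5, h6]
  · subst h10; simp [pvScan, pvPgRules, pvMatches]
  · subst h11; simp [pvScan, pvPgRules, pvMatches]
  · simp [pvScan, pvPgRules, pvMatches, em _ _ (Ne.symm h9), em _ _ (Ne.symm h10),
          em _ _ (Ne.symm h11), h9, h10, h11]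

-- A's postgres loops agree with the scan expansion, away from the 9.0 quirk
theorem pvPg_eq (parts : List String) (m0 m1 : Int)
    (h : ¬ (m0 = 9 ∧ m1 = 0 ∧
             (((PySem.List.pyGet? parts 2).bind PySem.Int.ofStr?).all
               (fun p2 => decide (p2 < 7))) = true)) :
    (if m0 > 11 then some ((false : Bool), (false : Bool))
     else if m0 = 9 then
       match pvPgLoop9 m1 parts pvUpgradeTargets with
       | none => none
       | some b => some (true, b)
     else some (true, pvPgLoopOther m0 m1 pvUpgradeTargets)) =
    (if m0 > 11 then some ((false : Bool), (false : Bool))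
     else
       if m0 = 9 then
         if m1 = 4 then pvPatch parts 21
         else if m1 = 5 then pvPatch parts 16
         else if m1 = 6 then pvPatch parts 12
         else some (true, false)
       else if m0 = 10 then some (true, decide (m1 < 7))
       else if m0 = 11 then some (true, decide (m1 < 2))
       else some (true, false)) := by
  by_cases hgt : m0 > 11
  · rw [if_pos hgt, if_pos hgt]
  · rw [if_neg hgt, if_neg hgt]
    by_cases h9 : m0 = 9
    · subst h9
      rw [if_pos rfl, if_pos rfl]
      by_cases h4 : m1 = 4
      · subst h4
        simp only [pvPgLoop9, pvUpgradeTargets, pvPatch]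
        norm_num
        cases hg2 : PySem.List.pyGet? parts 2 with
        | none => simp
        | some s2 =>
          cases ho2 : PySem.Int.ofStr? s2 with
          | none => simp [ho2]
          | some p2 => by_cases hlt : p2 < 21 <;> simp [ho2, hlt]
      · by_cases h5 : m1 = 5
        · subst h5
          simp only [pvPgLoop9, pvUpgradeTargets, pvPatch]
          norm_num
          cases hg2 : PySem.List.pyGet? parts 2 with
          | none => simp
          | some s2 =>
            cases ho2 : PySem.Int.ofStr? s2 with
            | none => simp [ho2]
            | some p2 => by_cases hlt : p2 < 16 <;> simp [ho2, hlt]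
        · by_cases h6 : m1 = 6
          · subst h6
            simp only [pvPgLoop9, pvUpgradeTargets, pvPatch]
            norm_num
            cases hg2 : PySem.List.pyGet? parts 2 with
            | none => simp
            | some s2 =>
              cases ho2 : PySem.Int.ofStr? s2 with
              | none => simp [ho2]
              | some p2 => by_cases hlt : p2 < 12 <;> simp [ho2, hlt]
          · by_cases h0 : m1 = 0
            · -- the 9.0 quirk: ¬D means the patch component parses to some p2 ≥ 7
              subst h0
              have hall : ¬ (((PySem.List.pyGet? parts 2).bind PySem.Int.ofStr?).all
                  (fun p2 => decide (p2 < 7))) = true := fun hc => h ⟨rfl, rfl, hc⟩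
              simp only [pvPgLoop9, pvUpgradeTargets]
              norm_num
              cases hg2 : PySem.List.pyGet? parts 2 with
              | none => rw [hg2] at hall; simp at hall
              | some s2 =>
                rw [hg2] at hall
                cases ho2 : PySem.Int.ofStr? s2 with
                | none => simp [ho2] at hall
                | some p2 =>
                  simp [ho2] at hall
                  have hge : ¬ p2 < 7 := not_lt.mpr hall
                  have hge2 : ¬ p2 ≤ 1 := fun hlt => hge (by omega)
                  simp [ho2, hge, hge2]
            · simp [pvPgLoop9, pvUpgradeTargets, h4, h5, h6, h0]
    · rw [if_neg h9, if_neg h9]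
      by_cases h10 : m0 = 10
      · subst h10
        by_cases hlt : m1 < 7 <;>
          simp [pvPgLoopOther, pvUpgradeTargets, hlt]
      · by_cases h11 : m0 = 11
        · subst h11
          by_cases hlt : m1 < 2 <;>
            simp [pvPgLoopOther, pvUpgradeTargets, hlt]
        · simp [pvPgLoopOther, pvUpgradeTargets, h9, h10, h11]

-- the aurora/aurora-mysql branch agrees with B's reject + scan
theorem pvAurora_eq (ev : String) (parts : List String) :
    (match (match pvParseMM parts with
            | none => none
            | some (m0, m1) =>
              if m0 ≠ 5 ∨ m1 < 6 then some ((false : Bool), (false : Bool))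
              else if m1 = 6 then some (true, decide (ev < "5.6.mysql_aurora.1.19.2"))
              else if m1 = 7 then some (true, decide (ev < "5.7.mysql_aurora.2.04.4"))
              else some (true, false)) with
     | none => ((false : Bool), (false : Bool))
     | some r => r) =
    (match pvParseMM parts with
     | none => (false, false)
     | some (major, minor) =>
       if pvReject "aurora" major minor then (false, false)
       else
         match pvScan ev parts major minor pvAuroraRules with
         | none => (false, false)
         | some r => r) := by
  cases pvParseMM parts with
  | none => rfl
  | some mm =>
    obtain ⟨m0, m1⟩ := mm
    dsimp only
    by_cases hr : m0 ≠ 5 ∨ m1 < 6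
    · have ht : pvReject "aurora" m0 m1 = true := by
        rcases hr with h | h
        · simp [pvReject, h]
        · simp [pvReject, h]
      rw [if_pos hr, ht]; rfl
    · have hf : pvReject "aurora" m0 m1 = false := by
        have h5 : m0 = 5 := by by_contra hc; exact hr (Or.inl hc)
        have h6 : ¬ m1 < 6 := fun hc => hr (Or.inr hc)
        simp [pvReject, h5, h6]
      rw [if_neg hr, hf, pvScan_aurora]
      by_cases h6 : m1 = 6
      · rw [if_pos h6]; rfl
      · rw [if_neg h6]
        by_cases h7 : m1 = 7
        · rw [if_pos h7]; rfl
        · rw [if_neg h7]; rfl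

theorem pvMysql_eq (ev : String) (parts : List String) :
    (match (match pvParseMM parts with
            | none => none
            | some (m0, m1) =>
              if m0 = 5 ∧ m1 < 6 then some ((false : Bool), (false : Bool))
              else if m1 = 6 then some (true, decide (ev < "5.6.40"))
              else if m1 = 7 then some (true, decide (ev < "5.7.24"))
              else if m1 = 8 then some (true, decide (ev < "8.0.13"))
              else some (true, false)) with
     | none => ((false : Bool), (false : Bool))
     | some r => r) =
    (match pvParseMM parts with
     | none => (false, false)
     | some (major, minor) =>
       if pvReject "mysql" major minor then (false, false)
       else
         match pvScan ev parts major minor pvMysqlRules with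
         | none => (false, false)
         | some r => r) := by
  cases pvParseMM parts with
  | none => rfl
  | some mm =>
    obtain ⟨m0, m1⟩ := mm
    dsimp only
    by_cases hr : m0 = 5 ∧ m1 < 6
    · have ht : pvReject "mysql" m0 m1 = true := by simp [pvReject, hr.1, hr.2]
      rw [if_pos hr, ht]; rfl
    · have hf : pvReject "mysql" m0 m1 = false := by
        simp [pvReject]
        intro h5; by_contra hc
        exact hr ⟨h5, by omega⟩
      rw [if_neg hr, hf, pvScan_mysql]
      by_cases h6 : m1 = 6
      · rw [if_pos h6]; rfl
      · rw [if_neg h6]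
        by_cases h7 : m1 = 7
        · rw [if_pos h7]; rfl
        · rw [if_neg h7]
          by_cases h8 : m1 = 8
          · rw [if_pos h8]; rfl
          · rw [if_neg h8]; rfl

theorem pvPgFull_eq (ev : String) (parts : List String)
    (h : ¬ ((PySem.List.pyGet? parts 0).bind PySem.Int.ofStr? = some 9 ∧
            (PySem.List.pyGet? parts 1).bind PySem.Int.ofStr? = some 0 ∧
            (((PySem.List.pyGet? parts 2).bind PySem.Int.ofStr?).all
              (fun p2 => decide (p2 < 7))) = true)) :
    (match (match pvParseMM parts with
            | none => none
            | some (m0, m1) =>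
              if m0 > 11 then some ((false : Bool), (false : Bool))
              else if m0 = 9 then
                match pvPgLoop9 m1 parts pvUpgradeTargets with
                | none => none
                | some b => some (true, b)
              else some (true, pvPgLoopOther m0 m1 pvUpgradeTargets)) with
     | none => ((false : Bool), (false : Bool))
     | some r => r) =
    (match pvParseMM parts with
     | none => (false, false)
     | some (major, minor) =>
       if pvReject "pg" major minor then (false, false)
       else
         match pvScan ev parts major minor pvPgRules with
         | none => (false, false)
         | some r => r) := by
  cases hp : pvParseMM parts with
  | none => rfl
  | some mm =>
    obtain ⟨m0, m1⟩ := mm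
    obtain ⟨hc0, hc1⟩ := pvParseMM_fst_snd parts m0 m1 hp
    dsimp only
    have hD : ¬ (m0 = 9 ∧ m1 = 0 ∧
        (((PySem.List.pyGet? parts 2).bind PySem.Int.ofStr?).all
          (fun p2 => decide (p2 < 7))) = true) := by
      rintro ⟨rfl, rfl, hall⟩
      exact h ⟨hc0, hc1, hall⟩
    have hrej : pvReject "pg" m0 m1 = decide (m0 > 11) := by simp [pvReject]
    rw [pvScan_pg, hrej]
    have := pvPg_eq parts m0 m1 hD
    by_cases hgt : m0 > 11
    · simp [hgt]
    · rw [if_neg hgt, if_neg hgt] at this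
      rw [if_neg hgt, this]
      have e : decide (m0 > 11) = false := by simp [hgt]
      rw [e]
      simp only [Bool.false_eq_true, if_false]

theorem pvDiff_sub (engine ev : String)
    (hpg : engine = "postgres" ∨ engine = "aurora-postgresql")
    (h0 : (PySem.List.pyGet? (pvSplitDot ev) 0).bind PySem.Int.ofStr? = some 9)
    (h1 : (PySem.List.pyGet? (pvSplitDot ev) 1).bind PySem.Int.ofStr? = some 0)
    (h2 : (((PySem.List.pyGet? (pvSplitDot ev) 2).bind PySem.Int.ofStr?).all
            (fun p2 => decide (p2 < 7))) = true) :
    pvTryA engine ev (pvSplitDot ev) ≠ some (true, false) ∧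
    pvScan ev (pvSplitDot ev) 9 0 pvPgRules = some (true, false) := by
  have hne1 : ¬ (engine = "aurora" ∨ engine = "aurora-mysql") := by
    rcases hpg with h' | h' <;> subst h' <;> decide
  have hne2 : engine ≠ "mysql" := by rcases hpg with h' | h' <;> subst h' <;> decide
  have hp : pvParseMM (pvSplitDot ev) = some (9, 0) := pvParseMM_of_components _ _ _ h0 h1
  constructor
  · unfold pvTryA
    rw [if_neg hne1, if_neg hne2, if_pos hpg, hp]
    simp only [pvPgLoop9, pvUpgradeTargets]
    norm_num
    cases hg2 : PySem.List.pyGet? (pvSplitDot ev) 2 with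
    | none => simp
    | some s2 =>
      rw [hg2] at h2
      cases ho2 : PySem.Int.ofStr? s2 with
      | none => simp [ho2]
      | some p2 =>
        simp [ho2] at h2
        simp [ho2, h2]
  · rw [pvScan_pg]; norm_num

-- ===== VERDICT (by name: the statement is the Claim_ definition above) =====
theorem analyze_engine_info_spec : Claim_unchanged_analyze_engine_info := by
  intro engine ev mode _ hnd
  unfold analyze_engine_info analyze_engine_info_alt
  by_cases hs : mode = "serverless"
  · rw [if_pos hs, if_pos hs]
  · rw [if_neg hs, if_neg hs]
    by_cases ha1 : engine = "aurora"
    · subst ha1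
      unfold pvTryA
      rw [if_pos (Or.inl rfl)]
      exact pvAurora_eq ev (pvSplitDot ev)
    · by_cases ha2 : engine = "aurora-mysql"
      · subst ha2
        unfold pvTryA
        rw [if_pos (Or.inr rfl)]
        exact pvAurora_eq ev (pvSplitDot ev)
      · by_cases hm : engine = "mysql"
        · subst hm
          unfold pvTryA
          rw [if_neg (by decide : ¬ (("mysql" : String) = "aurora" ∨ ("mysql" : String) = "aurora-mysql")), if_pos rfl]
          exact pvMysql_eq ev (pvSplitDot ev)
        · by_cases hp1 : engine = "postgres"
          · subst hp1
            have hnot : ¬ ((PySem.List.pyGet? (pvSplitDot ev) 0).bind PySem.Int.ofStr? = some 9 ∧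
                (PySem.List.pyGet? (pvSplitDot ev) 1).bind PySem.Int.ofStr? = some 0 ∧
                (((PySem.List.pyGet? (pvSplitDot ev) 2).bind PySem.Int.ofStr?).all
                  (fun p2 => decide (p2 < 7))) = true) := by
              intro hc; exact hnd ⟨hs, Or.inl rfl, hc.1, hc.2.1, hc.2.2⟩
            have := pvPgFull_eq ev (pvSplitDot ev) hnot
            unfold pvTryA
            rw [if_neg (by decide), if_neg (by decide), if_pos (Or.inl rfl)]
            exact this
          · by_cases hp2 : engine = "aurora-postgresql"
            · subst hp2
              have hnot : ¬ ((PySem.List.pyGet? (pvSplitDot ev) 0).bind PySem.Int.ofStr? = some 9 ∧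
                  (PySem.List.pyGet? (pvSplitDot ev) 1).bind PySem.Int.ofStr? = some 0 ∧
                  (((PySem.List.pyGet? (pvSplitDot ev) 2).bind PySem.Int.ofStr?).all
                    (fun p2 => decide (p2 < 7))) = true) := by
                intro hc; exact hnd ⟨hs, Or.inr rfl, hc.1, hc.2.1, hc.2.2⟩
              have := pvPgFull_eq ev (pvSplitDot ev) hnot
              unfold pvTryA
              rw [if_neg (by decide), if_neg (by decide), if_pos (Or.inr rfl)]
              exact this
            · have hA : pvTryA engine ev (pvSplitDot ev) = some (false, false) := by
                unfold pvTryA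
                rw [if_neg (by tauto), if_neg hm, if_neg (by tauto)]
              have hB : PySem.Dict.get? pvSpecs engine = none := by
                have e1 : (("aurora" : String) == engine) = false := by simp [Ne.symm ha1]
                have e2 : (("aurora-mysql" : String) == engine) = false := by simp [Ne.symm ha2]
                have e3 : (("mysql" : String) == engine) = false := by simp [Ne.symm hm]
                have e4 : (("postgres" : String) == engine) = false := by simp [Ne.symm hp1]
                have e5 : (("aurora-postgresql" : String) == engine) = false := by simp [Ne.symm hp2]
                rw [show pvSpecs = PySem.Dict.mk
                    [("aurora", ("aurora", pvAuroraRules)),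
                     ("aurora-mysql", ("aurora", pvAuroraRules)),
                     ("mysql", ("mysql", pvMysqlRules)),
                     ("postgres", ("pg", pvPgRules)),
                     ("aurora-postgresql", ("pg", pvPgRules))] from rfl]
                simp [e1, e2, e3, e4, e5, PySem.Dict.get?]
              rw [hA, hB]

theorem analyze_engine_info_changed : Claim_changed_analyze_engine_info := by
  unfold Claim_changed_analyze_engine_info; decide

theorem analyze_engine_info_tight : Claim_exact_analyze_engine_info := by
  intro engine ev mode _ hd
  obtain ⟨hs, hpg, h0, h1, h2⟩ := hd
  obtain ⟨hA, hB⟩ := pvDiff_sub engine ev hpg h0 h1 h2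
  have hp : pvParseMM (pvSplitDot ev) = some (9, 0) := pvParseMM_of_components _ _ _ h0 h1
  unfold analyze_engine_info analyze_engine_info_alt
  rw [if_neg hs, if_neg hs]
  have hspec : PySem.Dict.get? pvSpecs engine = some ("pg", pvPgRules) := by
    rcases hpg with h' | h' <;> subst h' <;> rfl
  rw [hspec, hp]
  have hrej : pvReject "pg" 9 0 = false := by decide
  dsimp only
  rw [hrej]
  simp only [Bool.false_eq_true, if_false]
  rw [hB]
  cases hta : pvTryA engine ev (pvSplitDot ev) with
  | none => decide
  | some r =>
    intro hr
    exact hA (by rw [hta]; exact congrArg some hr)
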